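-- pv_equiv track=rewrite | github.com/Davidsondev12/Devoir-S1 | projet exo2.py | colonne
-- ===== SOURCE A (Python) =====
-- def colonne(prime_implicant):
--     """
--     Crée les colonnes du tableau de couverture avec les implicants premiers.
--     """
--     if "-" not in prime_implicant:
--         return [prime_implicant]
--     col = []
--     idx = prime_implicant.index("-")
--     for bit in ['0', '1']:
--         tmp = prime_implicant.copy()
--         tmp[idx] = bit
--         arr = colonne(tmp)
--         for k in arr:
--             col.append(k)
--     return col
-- ===== SOURCE B (Python) =====
-- def colonne(prime_implicant):
--     """
--     Crée les colonnes du tableau de couverture avec les implicants premiers.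
--     Flat expansion: collect the dash positions once, build the table of all
--     bit combinations iteratively (leftmost dash slowest), then assign.
--     """
--     idxs = [i for i, c in enumerate(prime_implicant) if c == "-"]
--     if not idxs:
--         return [prime_implicant]
--     combos = [[]]
--     for _ in idxs:
--         combos = [c + [b] for c in combos for b in ('0', '1')]
--     res = []
--     for bits in combos:
--         tmp = prime_implicant.copy()
--         for i, b in zip(idxs, bits):
--             tmp[i] = b
--         res.append(tmp)
--     return res
-- ===== Notes on version B (the rewrite author's own statement) =====
-- stated objective: alternative
-- what changed: Replaces A's recursion on the first '-' (re-scanning and copying the whole list at every level) with a single flat pass: collect all dash positions once, build the table of bit combinations iteratively, and assign each combination into one copy.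
import Mathlib
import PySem

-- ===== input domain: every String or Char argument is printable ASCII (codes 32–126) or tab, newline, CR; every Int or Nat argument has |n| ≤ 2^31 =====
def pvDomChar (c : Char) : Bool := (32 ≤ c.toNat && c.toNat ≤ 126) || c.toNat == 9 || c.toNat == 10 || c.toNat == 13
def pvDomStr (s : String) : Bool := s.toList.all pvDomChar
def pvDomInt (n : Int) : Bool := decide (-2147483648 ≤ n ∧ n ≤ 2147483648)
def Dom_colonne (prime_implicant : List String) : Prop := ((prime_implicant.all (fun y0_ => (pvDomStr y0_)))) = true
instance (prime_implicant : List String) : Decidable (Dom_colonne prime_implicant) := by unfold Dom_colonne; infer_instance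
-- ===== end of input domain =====

-- B replaces A's first-dash recursion by one flat pass: collect dash positions, build the
-- combination table iteratively, assign each combination into a copy (objective: alternative).

-- termination helper for port A: overwriting the found '-' strictly decreases the '-' count
lemma pv_count_set_lt (xs : List String) (idx : Nat) (b : String) (hb : b ≠ "-")
    (h : PySem.List.index? xs "-" = some idx) :
    (xs.set idx b).count "-" < xs.count "-" := by
  rcases (PySem.List.index?_eq_some_iff _ _ _).mp h with ⟨pre, suf, hxs, hlen, hnp⟩
  subst hxs
  subst hlen
  rw [List.set_append_right _ _ (Nat.le_refl _)]
  simp [List.count_append, hb]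

-- ===== PORT A =====
-- literal port of A; the two-iteration loop 'for bit in ['0','1']' is unrolled
-- (col starts [] and extends with each recursive result, i.e. the two results appended)
def colonne (prime_implicant : List String) : List (List String) :=
  if "-" ∈ prime_implicant then
    match hidx : PySem.List.index? prime_implicant "-" with
    | none => []  -- unreachable: "-" ∈ prime_implicant guarantees index? is some
    | some idx =>
        colonne (prime_implicant.set idx "0") ++ colonne (prime_implicant.set idx "1")
  else [prime_implicant]
termination_by prime_implicant.count "-"
decreasing_by
  · exact pv_count_set_lt _ _ _ (by decide) hidx
  · exact pv_count_set_lt _ _ _ (by decide) hidx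

-- ===== PORT B =====
-- literal port of Source B: enumerate+filter comprehension, iterative combination table, zip-assign
def colonne_alt (prime_implicant : List String) : List (List String) :=
  let idxs := ((PySem.List.enumerate prime_implicant).filter (fun p => p.2 == "-")).map (fun p => p.1)
  if idxs = [] then [prime_implicant]
  else
    let combos := idxs.foldl (fun acc _ => acc.flatMap (fun c => [c ++ ["0"], c ++ ["1"]]))
      [([] : List String)]
    combos.map (fun bits =>
      (idxs.zip bits).foldl (fun tmp ib => PySem.List.pySetD tmp ib.1 ib.2) prime_implicant)

-- ===== PRECONDITION & SPEC =====
def Spec_colonne (prime_implicant : List String) (out : List (List String)) : Prop := out = colonne_alt prime_implicant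
instance (prime_implicant : List String) (out : List (List String)) : Decidable (Spec_colonne prime_implicant out) := by unfold Spec_colonne; infer_instance

-- ===== CLAIM (what is proved, stated in full; the proofs are below) =====
def Claim_equal_colonne : Prop := ∀ (prime_implicant : List String), Dom_colonne prime_implicant → Spec_colonne prime_implicant (colonne prime_implicant)

-- ===== LEMMAS AND PROOFS =====

-- proof-only helpers
def dashRec (k : Int) : List String → List Int
  | [] => []
  | c :: cs => if c = "-" then k :: dashRec (k + 1) cs else dashRec (k + 1) cs

def combosTab : Nat → List (List String)
  | 0 => [[]]
  | n + 1 => (combosTab n).flatMap (fun c => [c ++ ["0"], c ++ ["1"]])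

def assignBits (xs : List String) (idxs : List Int) (bits : List String) : List String :=
  (idxs.zip bits).foldl (fun tmp ib => PySem.List.pySetD tmp ib.1 ib.2) xs

lemma dashRec_eq_filter (xs : List String) (k : Int) :
    ((PySem.List.enumerate xs k).filter (fun p => p.2 == "-")).map (fun p => p.1) = dashRec k xs := by
  induction xs generalizing k with
  | nil => simp [dashRec, PySem.List.enumerate_nil]
  | cons c cs ih =>
      rw [PySem.List.enumerate_cons]
      by_cases hc : c = "-" <;> simp [dashRec, hc, ih]

lemma foldl_combosTab (l : List Int) (m : Nat) :
    l.foldl (fun acc _ => acc.flatMap (fun c => [c ++ ["0"], c ++ ["1"]])) (combosTab m)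
      = combosTab (m + l.length) := by
  induction l generalizing m with
  | nil => simp
  | cons x l ih =>
      rw [List.foldl_cons, show (combosTab m).flatMap (fun c => [c ++ ["0"], c ++ ["1"]]) = combosTab (m + 1) from rfl, ih]
      congr 1
      simp [List.length_cons]
      omega

lemma combosTab_succ (n : Nat) :
    combosTab (n + 1) = ["0", "1"].flatMap (fun b => (combosTab n).map (b :: ·)) := by
  induction n with
  | zero => decide
  | succ n ih =>
      rw [show combosTab (n + 1 + 1) = (combosTab (n + 1)).flatMap (fun c => [c ++ ["0"], c ++ ["1"]]) from rfl]
      conv_lhs => rw [ih]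
      conv_rhs => rw [show combosTab (n + 1) = (combosTab n).flatMap (fun c => [c ++ ["0"], c ++ ["1"]]) from rfl]
      simp [List.flatMap_cons, List.flatMap_nil, List.map_flatMap, List.flatMap_map]

lemma dashRec_append (pre l : List String) (hnp : "-" ∉ pre) (k : Int) :
    dashRec k (pre ++ l) = dashRec (k + pre.length) l := by
  induction pre generalizing k with
  | nil => simp
  | cons p ps ih =>
      have hp : p ≠ "-" := fun h => hnp (h ▸ List.mem_cons_self)
      have hps : "-" ∉ ps := fun h => hnp (List.mem_cons_of_mem _ h)
      rw [List.cons_append, show dashRec k ((p :: (ps ++ l)) ) = dashRec (k+1) (ps ++ l) from by simp [dashRec, hp], ih hps]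
      congr 1
      simp only [List.length_cons]
      push_cast
      ring

lemma dashRec_nil_of_not_mem (xs : List String) (k : Int) (h : "-" ∉ xs) : dashRec k xs = [] := by
  induction xs generalizing k with
  | nil => rfl
  | cons c cs ih =>
      have hc : c ≠ "-" := fun hc => h (hc ▸ List.mem_cons_self)
      simp only [dashRec, if_neg hc]
      exact ih _ (fun hm => h (List.mem_cons_of_mem _ hm))

-- B computes the combination table applied through assignBits
lemma colonne_alt_char (xs : List String) :
    colonne_alt xs = (combosTab (dashRec 0 xs).length).map (assignBits xs (dashRec 0 xs)) := by
  unfold colonne_alt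
  rw [dashRec_eq_filter]
  by_cases h : dashRec 0 xs = []
  · simp [h, combosTab, assignBits]
  · simp only [h]
    rw [show [([] : List String)] = combosTab 0 from rfl, foldl_combosTab]
    simp [assignBits]

-- A computes the same table, by strong induction on the number of dashes
lemma colonne_char : ∀ (n : Nat) (xs : List String), xs.count "-" = n →
    colonne xs = (combosTab (dashRec 0 xs).length).map (assignBits xs (dashRec 0 xs)) := by
  intro n
  induction n using Nat.strong_induction_on with
  | _ n ih =>
    intro xs hn
    unfold colonne
    by_cases hmem : "-" ∈ xs
    · simp only [hmem, if_pos]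
      have hsome : (PySem.List.index? xs "-").isSome := (PySem.List.index?_isSome_iff _ _).mpr hmem
      obtain ⟨idx, hidx⟩ := Option.isSome_iff_exists.mp hsome
      rw [hidx]
      rcases (PySem.List.index?_eq_some_iff _ _ _).mp hidx with ⟨pre, suf, hxs, hlen, hnp⟩
      subst hxs; subst hlen
      have hset : ∀ b : String, (pre ++ "-" :: suf).set pre.length b = pre ++ b :: suf := by
        intro b
        rw [List.set_append_right _ _ (Nat.le_refl _)]
        simp
      have hd0 : dashRec 0 (pre ++ "-" :: suf) = (pre.length : Int) :: dashRec ((pre.length : Int) + 1) suf := by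
        rw [dashRec_append _ _ hnp]
        simp [dashRec]
      have hdb : ∀ b : String, b ≠ "-" → dashRec 0 (pre ++ b :: suf) = dashRec ((pre.length : Int) + 1) suf := by
        intro b hb
        rw [dashRec_append _ _ hnp]
        simp [dashRec, hb]
      have hcnt : ∀ b : String, b ≠ "-" → (pre ++ b :: suf).count "-" < n := by
        intro b hb
        rw [← hn]
        simp [List.count_append, hb]
      have h0 := ih _ (hcnt "0" (by decide)) _ rfl
      have h1 := ih _ (hcnt "1" (by decide)) _ rfl
      show colonne ((pre ++ "-" :: suf).set pre.length "0") ++ colonne ((pre ++ "-" :: suf).set pre.length "1") = _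
      rw [hset "0", hset "1", h0, h1, hd0, hdb "0" (by decide), hdb "1" (by decide)]
      set r := dashRec ((pre.length : Int) + 1) suf with hr
      rw [List.length_cons, combosTab_succ]
      have hassign : ∀ (b : String) (bits : List String),
          assignBits (pre ++ "-" :: suf) ((pre.length : Int) :: r) (b :: bits)
            = assignBits (pre ++ b :: suf) r bits := by
        intro b bits
        unfold assignBits
        rw [List.zip_cons_cons, List.foldl_cons]
        congr 1
        rw [PySem.List.pySetD_natCast, hset b]
      simp only [List.flatMap_cons, List.flatMap_nil, List.append_nil, List.map_append, List.map_map]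
      congr 1 <;> (apply List.map_congr_left; intro bits _; simp [Function.comp, hassign])
    · simp only [hmem]
      rw [dashRec_nil_of_not_mem _ _ hmem]
      simp [combosTab, assignBits]

-- ===== VERDICT (by name: the statement is the Claim_ definition above) =====
theorem colonne_spec : Claim_equal_colonne := by
  intro xs _
  unfold Spec_colonne
  rw [colonne_char (xs.count "-") xs rfl, colonne_alt_char]
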